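-- pv_equiv track=rewrite | github.com/hat-open/hat-core | src_py/hat/event/common.py | matches_query_type
-- ===== SOURCE A (Python) =====
-- def matches_query_type(event_type, query_type):
--     """Determine if event type matches query type
--
--     Event type is tested if it matches query type according to the following
--     rules:
--
--         * Matching is performed on subtypes in increasing order.
--         * Event type is a match only if all its subtypes are matched by
--           corresponding query subtypes.
--         * Matching is finished when all query subtypes are exhausted.
--         * Query subtype '?' matches exactly one event subtype of any value.
--           The subtype must exist.
--         * Query subtype '*' matches 0 or more event subtypes of any value. It
--           must be the last query subtype.
--         * All other values of query subtype match exactly one event subtype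
--           of the same value.
--         * Query type without subtypes is matched only by event type with no
--           subtypes.
--
--     As a consequence of aforementioned matching rules, event subtypes '*' and
--     '?' cannot be directly matched and it is advisable not to use them in event
--     types.
--
--     Args:
--         event_type (EventType): event type
--         query_type (EventType): query type
--
--     Returns:
--         bool: true if matches
--
--     """
--     if not event_type:
--         if not query_type or query_type[0] == '*':
--             return True
--         else:
--             return False
--     if not query_type:
--         return False
--     if query_type[0] == '*':
--         return True
--     elif query_type[0] == '?' or query_type[0] == event_type[0]:
--         return matches_query_type(event_type[1:], query_type[1:])
--     return False
-- ===== SOURCE B (Python) =====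
-- def matches_query_type(event_type, query_type):
--     for i, q in enumerate(query_type):
--         if q == '*':
--             return True
--         if i >= len(event_type) or (q != '?' and q != event_type[i]):
--             return False
--     return len(event_type) == len(query_type)
-- ===== Notes on version B (the rewrite author's own statement) =====
-- stated objective: faster
-- what changed: Replaces A's tail recursion on list suffixes (each step copying both lists via [1:]) by a single positional index loop over query_type with a final length-equality check, avoiding all slicing.
import Mathlib
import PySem

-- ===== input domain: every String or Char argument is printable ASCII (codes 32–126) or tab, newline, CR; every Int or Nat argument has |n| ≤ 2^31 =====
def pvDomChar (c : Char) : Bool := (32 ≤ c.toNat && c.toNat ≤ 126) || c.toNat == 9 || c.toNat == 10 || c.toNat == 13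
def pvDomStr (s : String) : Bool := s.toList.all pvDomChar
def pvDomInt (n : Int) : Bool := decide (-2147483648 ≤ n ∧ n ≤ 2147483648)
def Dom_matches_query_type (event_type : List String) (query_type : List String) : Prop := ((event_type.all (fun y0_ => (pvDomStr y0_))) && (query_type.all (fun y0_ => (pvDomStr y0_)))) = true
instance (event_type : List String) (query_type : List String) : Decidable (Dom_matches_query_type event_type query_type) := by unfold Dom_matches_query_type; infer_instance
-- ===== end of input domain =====

-- B replaces A's slice-copying suffix recursion by a single index loop over
-- query_type plus a final length-equality check (objective: faster, no slicing).

-- ===== PORT A =====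
-- literal transliteration of A's recursion on the two lists
def matches_query_type (event_type : List String) (query_type : List String) : Bool :=
  match event_type with
  | [] =>
    match query_type with
    | [] => true
    | q :: _ => q == "*"
  | e :: es =>
    match query_type with
    | [] => false
    | q :: qs =>
      if q == "*" then true
      else if q == "?" || q == e then matches_query_type es qs
      else false

-- ===== PORT B =====
-- the for-loop of Source B: index i runs over query_type, with early returns
def matchLoop (event_type : List String) (query_type : List String) (i : Nat) : Bool :=
  if h : i < query_type.length then
    let q := query_type[i]
    if q == "*" then true
    else if event_type.length ≤ i || (q != "?" && q != event_type.getD i "") then false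
    else matchLoop event_type query_type (i + 1)
  else
    event_type.length == query_type.length
termination_by query_type.length - i

def matches_query_type_alt (event_type : List String) (query_type : List String) : Bool :=
  matchLoop event_type query_type 0

-- ===== PRECONDITION & SPEC =====
def Spec_matches_query_type (event_type : List String) (query_type : List String) (out : Bool) : Prop := out = matches_query_type_alt event_type query_type
instance (event_type : List String) (query_type : List String) (out : Bool) : Decidable (Spec_matches_query_type event_type query_type out) := by unfold Spec_matches_query_type; infer_instance

-- ===== CLAIM (what is proved, stated in full; the proofs are below) =====
def Claim_equal_matches_query_type : Prop := ∀ (event_type : List String) (query_type : List String), Dom_matches_query_type event_type query_type → Spec_matches_query_type event_type query_type (matches_query_type event_type query_type)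

-- ===== LEMMAS AND PROOFS =====

-- the loop at index i computes A on the suffixes from i (for reachable i)
theorem matchLoop_eq_drop (event_type query_type : List String) (i : Nat)
    (he : i ≤ event_type.length) (hq : i ≤ query_type.length) :
    matchLoop event_type query_type i
      = matches_query_type (event_type.drop i) (query_type.drop i) := by
  suffices H : ∀ n i, query_type.length - i = n → i ≤ event_type.length →
      i ≤ query_type.length →
      matchLoop event_type query_type i
        = matches_query_type (event_type.drop i) (query_type.drop i) from
    H _ i rfl he hq
  clear he hq i
  intro n
  induction n with
  | zero =>
    intro i hgen he hq
    have hiq : i = query_type.length := by omega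
    have hqd : query_type.drop i = [] := List.drop_eq_nil_of_le (by omega)
    rw [matchLoop, dif_neg (by omega), hqd]
    rcases Nat.lt_or_ge event_type.length i with h | h
    · omega
    · rcases Nat.eq_or_lt_of_le h with h' | h'
      · have hed : event_type.drop i = [] := List.drop_eq_nil_of_le (by omega)
        rw [hed]
        simp [matches_query_type, ← h', hiq]
      · have hed : event_type.drop i ≠ [] := by
          simp [List.drop_eq_nil_iff]; omega
        rcases hx : event_type.drop i with _ | ⟨e, es⟩
        · exact absurd hx hed
        · simp only [matches_query_type]
          simp; omega
  | succ n ih =>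
    intro i hgen he hq
    have hi : i < query_type.length := by omega
    have hqd : query_type.drop i = query_type[i] :: query_type.drop (i + 1) :=
      List.drop_eq_getElem_cons hi
    rw [matchLoop, dif_pos hi]
    by_cases hstar : query_type[i] == "*"
    · rw [hqd]
      rcases Nat.lt_or_ge i event_type.length with h | h
      · rw [List.drop_eq_getElem_cons h]
        simp [matches_query_type, hstar]
      · have hed : event_type.drop i = [] := List.drop_eq_nil_of_le (by omega)
        rw [hed]
        simp [matches_query_type, hstar]
    · rcases Nat.lt_or_ge i event_type.length with h | h
      · have hgetD : event_type.getD i "" = event_type[i] := by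
          simp [List.getD, List.getElem?_eq_getElem h]
        rw [hqd, List.drop_eq_getElem_cons h]
        simp only [matches_query_type, hstar, Bool.if_false_left,
          hgetD, Nat.not_le.mpr h, decide_false, Bool.false_or]
        by_cases hqm : (query_type[i] == "?" || query_type[i] == event_type[i]) = true
        · have hrec := ih (i + 1) (by omega) (by omega) (by omega)
          have hcnot : (query_type[i] != "?" && query_type[i] != event_type[i]) = false := by
            simp only [bne, Bool.and_eq_false_iff]
            simpa [Bool.or_eq_true] using hqm
          rw [hcnot, if_neg (by simp), if_pos hqm]
          exact hrec
        · have hcnot : (query_type[i] != "?" && query_type[i] != event_type[i]) = true := by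
            simp only [Bool.or_eq_true] at hqm
            simp only [Bool.or_eq_true, not_or] at hqm
            simp [bne, hqm.1, hqm.2]
          rw [hcnot]
          simp [hqm]
      · have hed : event_type.drop i = [] := List.drop_eq_nil_of_le (by omega)
        rw [hqd, hed]
        simp only [matches_query_type, hstar]
        simp [show event_type.length ≤ i from h]

-- ===== VERDICT (by name: the statement is the Claim_ definition above) =====
theorem matches_query_type_spec : Claim_equal_matches_query_type := by
  intro et qt _
  unfold Spec_matches_query_type matches_query_type_alt
  simpa using (matchLoop_eq_drop et qt 0 (Nat.zero_le _) (Nat.zero_le _)).symm
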